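-- pv_equiv track=rewrite | github.com/yinju86/MaaPcrclanbattle | sharecode.py | from_share
-- ===== SOURCE A (Python) =====
-- def from_share(data):
--     data=base62_to_six_digit(data)
--     result = []
--     for entry in data:
--         # 拆分六位数字，前3位是十进制，第四位是一位数字，后两位是二进制
--         decimal_part = entry[:3]
--         single_digit = entry[3]
--         binary_part = f"{int(entry[4:]):06b}"
--         # 将二进制部分转化为布尔列表
--         bool_list = [b == '1' for b in binary_part]
--         # 组合成原始结构
--         result.append((decimal_part, single_digit, bool_list))
--     return result
--
-- charset = "0123456789abcdefghijklmnopqrstuvwxyzABCDEFGHIJKLMNOPQRSTUVWXYZ"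
--
-- def from_base62(base62_str):
--     num = 0
--     for char in base62_str:
--         num = num * 62 + charset.index(char)
--     return num
--
-- def base62_to_six_digit(encoded_str):
--     result = []
--     # 每3个字符为一组
--     for i in range(0, len(encoded_str), 3):
--         # 取出每三个字符
--         base62_chunk = encoded_str[i:i+3]
--         # 将62进制字符转为整数
--         decimal_number = from_base62(base62_chunk)
--         # 转为六位数字，不足的用 '0' 补齐
--         result.append(str(decimal_number).zfill(6))
--     return result
-- ===== SOURCE B (Python) =====
-- charset = "0123456789abcdefghijklmnopqrstuvwxyzABCDEFGHIJKLMNOPQRSTUVWXYZ"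
--
-- def from_share(data):
--     result = []
--     for i in range(0, len(data), 3):
--         num = 0
--         for ch in data[i:i+3]:
--             num = num * 62 + charset.index(ch)
--         first_three, rest = divmod(num, 1000)
--         fourth, value = divmod(rest, 100)
--         result.append((str(first_three).zfill(3), str(fourth),
--                        [c == '1' for c in format(value, '06b')]))
--     return result
-- ===== Notes on version B (the rewrite author's own statement) =====
-- stated objective: simpler
-- what changed: B fuses the two helper passes into one loop and extracts the three fields from the decoded number by divmod arithmetic (num//1000, num//100%10, num%100) instead of building an intermediate list of zero-padded 6-digit strings and slicing them.
import Mathlib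
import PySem

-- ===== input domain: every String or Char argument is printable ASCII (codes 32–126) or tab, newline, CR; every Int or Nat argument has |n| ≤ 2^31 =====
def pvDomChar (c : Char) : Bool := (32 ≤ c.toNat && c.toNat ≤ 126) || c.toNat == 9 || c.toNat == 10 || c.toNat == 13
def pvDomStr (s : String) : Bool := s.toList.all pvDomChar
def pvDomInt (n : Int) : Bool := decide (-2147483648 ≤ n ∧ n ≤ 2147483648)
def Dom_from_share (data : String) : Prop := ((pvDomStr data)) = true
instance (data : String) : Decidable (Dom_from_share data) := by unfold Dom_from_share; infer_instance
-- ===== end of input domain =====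

-- B fuses A's two passes into one loop and extracts the three fields by divmod
-- arithmetic on the decoded number instead of building zero-padded 6-digit
-- strings and slicing them (objective: simpler; same asymptotic cost).

-- ===== PORT A =====
def pvCharset : List Char := "0123456789abcdefghijklmnopqrstuvwxyzABCDEFGHIJKLMNOPQRSTUVWXYZ".toList

-- charset.index(char); Python raises ValueError when char is absent (find = -1), excluded by Pre_
def pvFromBase62 (cs : List Char) : Int :=
  cs.foldl (fun num c => num * 62 + PySem.Chars.find pvCharset [c]) 0

def pvBase62ToSix (s : List Char) : List (List Char) :=
  (PySem.List.pyRange 0 s.length 3).foldl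
    (fun res i =>
      res ++ [PySem.Chars.zfill
        (PySem.Int.toChars (pvFromBase62 (PySem.List.slice s (some i) (some (i + 3))))) 6]) []

def from_share (data : String) : List (String × String × List Bool) :=
  (pvBase62ToSix data.toList).foldl
    (fun result entry =>
      let decimal_part := PySem.List.slice entry none (some 3)
      -- entry[3]; IndexError (never reached: entry always has 6 chars) would be `none`
      let single_digit := (PySem.List.pyGet? entry 3).elim [] (fun c => [c])
      -- f"{int(entry[4:]):06b}"; int() ValueError (never reached) would be `none`
      let binary_part := PySem.Chars.zfill
        (PySem.Int.toBinChars ((PySem.Int.ofChars? (PySem.List.slice entry (some 4) none)).getD 0)) 6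
      result ++ [(String.ofList decimal_part, String.ofList single_digit,
                  binary_part.map (fun b => b == '1'))]) []

-- ===== PORT B =====
def from_share_alt (data : String) : List (String × String × List Bool) :=
  (PySem.List.pyRange 0 data.toList.length 3).foldl
    (fun result i =>
      let chunk := PySem.List.slice data.toList (some i) (some (i + 3))
      let num := chunk.foldl (fun n c => n * 62 + PySem.Chars.find pvCharset [c]) 0
      let first_three := PySem.Int.floordiv num 1000
      let rest := PySem.Int.mod num 1000
      let fourth := PySem.Int.floordiv rest 100
      let value := PySem.Int.mod rest 100
      result ++ [(String.ofList (PySem.Chars.zfill (PySem.Int.toChars first_three) 3),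
                  PySem.Int.toStr fourth,
                  (PySem.Chars.zfill (PySem.Int.toBinChars value) 6).map (fun b => b == '1'))]) []

-- ===== PRECONDITION & SPEC =====
-- Pre_ excludes exactly the inputs containing a character outside the base62 charset,
-- on which Python A raises ValueError in charset.index.
def Pre_from_share (data : String) : Prop := data.toList.all (fun c => pvCharset.contains c) = true
instance (data : String) : Decidable (Pre_from_share data) := by unfold Pre_from_share; infer_instance

def pvWitness_from_share : String := "aZ3"

def Spec_from_share (data : String) (out : List (String × String × List Bool)) : Prop := out = from_share_alt data
instance (data : String) (out : List (String × String × List Bool)) : Decidable (Spec_from_share data out) := by unfold Spec_from_share; infer_instance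

-- ===== CLAIM (what is proved, stated in full; the proofs are below) =====
def Claim_equal_from_share : Prop := ∀ (data : String), Dom_from_share data → Pre_from_share data → Spec_from_share data (from_share data)

-- ===== LEMMAS AND PROOFS =====

-- decimal chars of a Nat: what str(n) produces
def pvD (n : Nat) : List Char :=
  if n = 0 then ['0'] else ((Nat.digits 10 n).map Nat.digitChar).reverse

-- little-endian digit chars of n, k of them
def pvE (k n : Nat) : List Char :=
  (List.range k).map (fun i => Nat.digitChar (n / 10 ^ i % 10))

lemma pv_toDigitsCore (fuel : Nat) : ∀ (n : Nat) (ds : List Char), n ≤ fuel →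
    Nat.toDigitsCore 10 (fuel + 1) n ds = pvD n ++ ds := by
  induction fuel with
  | zero =>
    intro n ds h
    interval_cases n
    simp [Nat.toDigitsCore, pvD]
    decide
  | succ fuel ih =>
    intro n ds h
    rw [Nat.toDigitsCore]
    by_cases h10 : n / 10 = 0
    · simp only [h10, if_true]
      rcases Nat.eq_zero_or_pos n with rfl | hn
      · simp [pvD]; decide
      · have hn' : n ≠ 0 := by omega
        have hlt : n < 10 := by omega
        rw [pvD, if_neg hn', Nat.digits_of_lt 10 n hn' hlt]
        simp [Nat.mod_eq_of_lt hlt]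
    · have hle : n / 10 ≤ fuel := by omega
      simp only [h10, if_false]
      rw [ih (n / 10) _ hle]
      have hn : n ≠ 0 := by omega
      conv_rhs => rw [pvD, if_neg hn, Nat.digits_def' (by norm_num : (1:Nat) < 10) (by omega)]
      rw [pvD, if_neg h10]
      simp

lemma pv_toChars (n : Nat) : PySem.Int.toChars (n : Int) = pvD n := by
  rw [PySem.Int.toChars, if_neg (by omega)]
  show Nat.toDigits 10 _ = _
  rw [Nat.toDigits, Int.toNat_natCast, pv_toDigitsCore n n [] le_rfl, List.append_nil]

lemma pv_D_digit (n : Nat) : ∀ c ∈ pvD n, c.isDigit := by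
  intro c hc
  rw [pvD] at hc
  split_ifs at hc with h
  · simp at hc; subst hc; decide
  · simp only [List.mem_reverse, List.mem_map] at hc
    obtain ⟨d, hd, rfl⟩ := hc
    have := Nat.digits_lt_base (by norm_num) hd
    interval_cases d <;> decide

lemma pv_D_len (n k : Nat) (hk : 0 < k) (h : n < 10 ^ k) : (pvD n).length ≤ k := by
  rw [pvD]
  split_ifs with h0
  · simpa using hk
  · simpa using (Nat.digits_length_le_iff (by norm_num) n).mpr h

lemma pv_zfill_eq (cs : List Char) (k : Nat) (h : ∀ c ∈ cs, c.isDigit) :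
    PySem.Chars.zfill cs k = List.replicate (k - cs.length) '0' ++ cs := by
  rw [PySem.Chars.zfill.eq_def]
  split_ifs with hle
  · have : k - cs.length = 0 := by omega
    simp [this]
  · match cs, h with
    | [], _ => simp
    | c :: rest, h =>
      have hc : c.isDigit := h c (by simp)
      have h1 : ¬(c = '+' ∨ c = '-') := by
        rintro (rfl | rfl) <;> simp [Char.isDigit] at hc
      simp only []
      rw [if_neg h1]
      simp

lemma pv_E_mod (k n : Nat) : pvE k (n % 10 ^ k) = pvE k n := by
  unfold pvE
  apply List.map_congr_left
  intro i hi
  rw [List.mem_range] at hi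
  set q := n / 10 ^ k with hqdef
  set r := n % 10 ^ k with hrdef
  have hn : n = 10 ^ i * (10 ^ (k - i) * q) + r := by
    rw [← mul_assoc, ← pow_add, show i + (k - i) = k by omega]
    exact (Nat.div_add_mod n (10 ^ k)).symm
  have h2 : n / 10 ^ i = 10 ^ (k - i) * q + r / 10 ^ i := by
    rw [hn, Nat.mul_add_div (by positivity)]
  rw [h2, show 10 ^ (k - i) * q = 10 * (10 ^ (k - i - 1) * q) by
    rw [← mul_assoc, ← pow_succ', show k - i - 1 + 1 = k - i by omega]]
  rw [Nat.mul_add_mod]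

lemma pv_repl (k : Nat) : ∀ n : Nat, 0 < k → n < 10 ^ k →
    List.replicate (k - (pvD n).length) '0' ++ pvD n = (pvE k n).reverse := by
  induction k with
  | zero => intro n hk; omega
  | succ k ih =>
    intro n hk h
    have hq : n / 10 ^ k < 10 := by
      rw [Nat.div_lt_iff_lt_mul (by positivity)]
      calc n < 10 ^ (k + 1) := h
        _ = 10 * 10 ^ k := by ring
    have hE : (pvE (k + 1) n).reverse
        = Nat.digitChar (n / 10 ^ k % 10) :: (pvE k n).reverse := by
      unfold pvE; rw [List.range_succ]; simp
    rcases Nat.eq_zero_or_pos k with rfl | hk'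
    · have hn10 : n < 10 := by simpa using h
      have : pvD n = [Nat.digitChar n] := by
        rcases Nat.eq_zero_or_pos n with rfl | hn
        · rw [pvD]; simp; decide
        · rw [pvD, if_neg (by omega), Nat.digits_of_lt 10 n (by omega) hn10]
          simp
      rw [hE, this]
      simp [pvE, Nat.mod_eq_of_lt hn10]
    · set q := n / 10 ^ k with hqdef
      set r := n % 10 ^ k with hrdef
      have hr : r < 10 ^ k := Nat.mod_lt _ (by positivity)
      have hEk : pvE k n = pvE k r := (pv_E_mod k n).symm
      have hnqr : 10 ^ k * q + r = n := Nat.div_add_mod n (10 ^ k)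
      have hmod : q % 10 = q := Nat.mod_eq_of_lt hq
      rw [hE, hEk, ← ih r hk' hr, hmod]
      rcases Nat.eq_zero_or_pos q with hq0 | hqpos
      · have hnr : n = r := by rw [hq0, mul_zero, zero_add] at hnqr; omega
        have hlen : (pvD n).length ≤ k := pv_D_len n k hk' (by omega)
        rw [hq0, show Nat.digitChar 0 = '0' from rfl, ← hnr]
        rw [show k + 1 - (pvD n).length = (k - (pvD n).length) + 1 by omega]
        simp [List.replicate_succ]
      · have hn0 : n ≠ 0 := by
          rintro rfl
          rw [Nat.zero_div] at hqdef
          omega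
        have hdq : Nat.digits 10 q = [q] := Nat.digits_of_lt 10 q (by omega) hq
        have hlr : (Nat.digits 10 r).length ≤ k :=
          (Nat.digits_length_le_iff (by norm_num) r).mpr hr
        have key : Nat.digits 10 n
            = Nat.digits 10 r ++ List.replicate (k - (Nat.digits 10 r).length) 0 ++ [q] := by
          have h2 := Nat.digits_append_zeroes_append_digits
            (b := 10) (k := k - (Nat.digits 10 r).length) (m := q) (n := r)
            (by norm_num) (by omega)
          rw [hdq, show (Nat.digits 10 r).length + (k - (Nat.digits 10 r).length) = k by omega] at h2
          rw [show r + 10 ^ k * q = n by omega] at h2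
          exact h2.symm
        have hpvn : pvD n = Nat.digitChar q :: (List.replicate (k - (Nat.digits 10 r).length) '0'
            ++ ((Nat.digits 10 r).map Nat.digitChar).reverse) := by
          rw [pvD, if_neg hn0, key]
          simp [List.map_replicate]
          exact Or.inr (by decide)
        rcases Nat.eq_zero_or_pos r with hr0 | hrpos
        · rw [hpvn, hr0]
          simp only [Nat.digits_zero, List.length_nil, Nat.sub_zero, List.map_nil,
            List.reverse_nil, List.append_nil, List.length_cons, List.length_replicate]
          rw [show pvD 0 = ['0'] from rfl]
          rw [show k + 1 - (k + 1) = 0 by omega]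
          simp only [List.replicate_zero, List.nil_append, List.length_singleton]
          have hrep : List.replicate (k - 1) '0' ++ ['0'] = List.replicate k '0' := by
            rw [show k = k - 1 + 1 by omega, List.replicate_succ']
            simp
          simp [hrep]
        · have hpvr : pvD r = ((Nat.digits 10 r).map Nat.digitChar).reverse := by
            rw [pvD, if_neg (by omega)]
          rw [hpvn, hpvr]
          simp only [List.length_cons, List.length_append, List.length_replicate,
            List.length_reverse, List.length_map]
          rw [show k + 1 - (k - (Nat.digits 10 r).length + (Nat.digits 10 r).length + 1) = 0 by omega]
          simp

lemma pv_zfill_D (n k : Nat) (hk : 0 < k) (h : n < 10 ^ k) :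
    PySem.Chars.zfill (pvD n) (k : Int) = (pvE k n).reverse := by
  rw [pv_zfill_eq (pvD n) k (pv_D_digit n), pv_repl k n hk h]

lemma pv_find_bounds (c : Char) (h : c ∈ pvCharset) :
    0 ≤ PySem.Chars.find pvCharset [c] ∧ PySem.Chars.find pvCharset [c] < 62 := by
  have hnn : 0 ≤ PySem.Chars.find pvCharset [c] := by
    rw [PySem.Chars.find_nonneg_iff]
    obtain ⟨s, t, hst⟩ := List.append_of_mem h
    exact ⟨s, t, by rw [hst]; simp⟩
  refine ⟨hnn, ?_⟩
  have hle : PySem.Chars.find pvCharset [c] ≤ 62 := by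
    have := PySem.Chars.find_le_length pvCharset [c]
    simpa [pvCharset] using this
  rcases lt_or_eq_of_le hle with hlt | heq
  · exact hlt
  · exfalso
    have hspec := (PySem.Chars.find_spec (s := pvCharset) (sub := [c]) hnn).1
    rw [heq] at hspec
    simp [pvCharset] at hspec

lemma pv_horner_aux (cs : List Char) : ∀ acc : Int, (∀ c ∈ cs, c ∈ pvCharset) → 0 ≤ acc →
    0 ≤ cs.foldl (fun num c => num * 62 + PySem.Chars.find pvCharset [c]) acc ∧
    cs.foldl (fun num c => num * 62 + PySem.Chars.find pvCharset [c]) acc < (acc + 1) * 62 ^ cs.length := by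
  induction cs with
  | nil =>
    intro acc _ hacc
    exact ⟨hacc, by simp⟩
  | cons c rest ih =>
    intro acc h hacc
    have hc := pv_find_bounds c (h c (by simp))
    have h1 : 0 ≤ acc * 62 + PySem.Chars.find pvCharset [c] := by nlinarith [hc.1]
    have := ih (acc * 62 + PySem.Chars.find pvCharset [c]) (fun d hd => h d (by simp [hd])) h1
    refine ⟨this.1, ?_⟩
    simp only [List.foldl_cons, List.length_cons]
    calc List.foldl _ (acc * 62 + PySem.Chars.find pvCharset [c]) rest
        < (acc * 62 + PySem.Chars.find pvCharset [c] + 1) * 62 ^ rest.length := this.2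
      _ ≤ ((acc + 1) * 62) * 62 ^ rest.length := by
          have : acc * 62 + PySem.Chars.find pvCharset [c] + 1 ≤ (acc + 1) * 62 := by nlinarith [hc.2]
          have hp : (0:Int) < 62 ^ rest.length := by positivity
          nlinarith
      _ = (acc + 1) * 62 ^ (rest.length + 1) := by ring

lemma pv_ofChars_two : ∀ v : Fin 100,
    PySem.Int.ofChars? [Nat.digitChar ((v:Nat) / 10), Nat.digitChar ((v:Nat) % 10)] = some ((v:Nat) : Int) := by
  decide

-- the per-chunk equality: A's slice-the-6-digit-string fields = B's divmod fields
lemma pv_D_small (d : Nat) (h : d < 10) : pvD d = [Nat.digitChar d] := by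
  rcases Nat.eq_zero_or_pos d with rfl | hd
  · rw [pvD]; simp; decide
  · rw [pvD, if_neg (by omega), Nat.digits_of_lt 10 d (by omega) h]; simp

lemma pv_zfill_D6 (n : Nat) (h : n < 1000000) :
    PySem.Chars.zfill (pvD n) 6 =
    [Nat.digitChar (n / 100000 % 10), Nat.digitChar (n / 10000 % 10), Nat.digitChar (n / 1000 % 10),
     Nat.digitChar (n / 100 % 10), Nat.digitChar (n / 10 % 10), Nat.digitChar (n % 10)] := by
  have hpow : n < 10 ^ 6 := by norm_num [h]
  rw [show (6:Int) = ((6:Nat):Int) by norm_num, pv_zfill_D n 6 (by norm_num) hpow]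
  norm_num [pvE, List.range_succ]

lemma pv_zfill_D3 (n : Nat) (h : n < 1000) :
    PySem.Chars.zfill (pvD n) 3 =
    [Nat.digitChar (n / 100 % 10), Nat.digitChar (n / 10 % 10), Nat.digitChar (n % 10)] := by
  have hpow : n < 10 ^ 3 := by norm_num [h]
  rw [show (3:Int) = ((3:Nat):Int) by norm_num, pv_zfill_D n 3 (by norm_num) hpow]
  norm_num [pvE, List.range_succ]

lemma pv_chunk (cs : List Char) (h : ∀ c ∈ cs, c ∈ pvCharset) (hlen : cs.length ≤ 3) :
    (String.ofList (PySem.List.slice (PySem.Chars.zfill (PySem.Int.toChars (pvFromBase62 cs)) 6) none (some 3)),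
     String.ofList ((PySem.List.pyGet? (PySem.Chars.zfill (PySem.Int.toChars (pvFromBase62 cs)) 6) 3).elim [] (fun c => [c])),
     (PySem.Chars.zfill (PySem.Int.toBinChars ((PySem.Int.ofChars? (PySem.List.slice (PySem.Chars.zfill (PySem.Int.toChars (pvFromBase62 cs)) 6) (some 4) none)).getD 0)) 6).map (fun b => b == '1'))
    = (String.ofList (PySem.Chars.zfill (PySem.Int.toChars (PySem.Int.floordiv (pvFromBase62 cs) 1000)) 3),
       PySem.Int.toStr (PySem.Int.floordiv (PySem.Int.mod (pvFromBase62 cs) 1000) 100),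
       (PySem.Chars.zfill (PySem.Int.toBinChars (PySem.Int.mod (PySem.Int.mod (pvFromBase62 cs) 1000) 100)) 6).map (fun b => b == '1')) := by
  obtain ⟨hnn, hub⟩ := pv_horner_aux cs 0 h le_rfl
  rw [← pvFromBase62] at hnn hub
  obtain ⟨N, hN⟩ : ∃ N : Nat, pvFromBase62 cs = ↑N :=
    ⟨(pvFromBase62 cs).toNat, (Int.toNat_of_nonneg hnn).symm⟩
  have hN6 : N < 1000000 := by
    have h62 : (62:Int) ^ cs.length ≤ 62 ^ 3 := pow_le_pow_right₀ (by norm_num) hlen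
    have hi : (N : Int) < 1000000 := by
      rw [← hN]
      have h1 : pvFromBase62 cs < 62 ^ cs.length := by simpa using hub
      have h2 : (62:Int) ^ 3 < 1000000 := by norm_num
      omega
    exact_mod_cast hi
  -- arithmetic values of B's divmod fields
  have hmod1000 : PySem.Int.mod (N : Int) 1000 = ((N % 1000 : Nat) : Int) := by
    rw [PySem.Int.mod_eq_emod_of_pos (by norm_num)]
    push_cast
    rfl
  have hfd : PySem.Int.floordiv (N : Int) 1000 = ((N / 1000 : Nat) : Int) := by
    rw [PySem.Int.floordiv_eq_ediv_of_pos (by norm_num)]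
    push_cast
    rfl
  have hfourth : PySem.Int.floordiv (PySem.Int.mod (N : Int) 1000) 100 = ((N % 1000 / 100 : Nat) : Int) := by
    rw [hmod1000, PySem.Int.floordiv_eq_ediv_of_pos (by norm_num)]
    push_cast
    rfl
  have hvalue : PySem.Int.mod (PySem.Int.mod (N : Int) 1000) 100 = ((N % 100 : Nat) : Int) := by
    rw [hmod1000, PySem.Int.mod_eq_emod_of_pos (by norm_num)]
    rw [show ((N % 1000 : Nat) : Int) % 100 = ((N % 1000 % 100 : Nat) : Int) by push_cast; rfl]
    congr 1
    omega
  rw [hN, pv_toChars N, pv_zfill_D6 N hN6, hfd, hfourth, hvalue, pv_toChars (N / 1000)]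
  -- A's int(entry[4:]) is N % 100
  have hof := pv_ofChars_two ⟨N % 100, by omega⟩
  rw [Fin.val_mk] at hof
  rw [show N % 100 / 10 = N / 10 % 10 by omega, show N % 100 % 10 = N % 10 by omega] at hof
  refine congrArg₂ Prod.mk ?_ (congrArg₂ Prod.mk ?_ ?_)
  · -- first component
    rw [PySem.List.slice_to _ (by norm_num), pv_zfill_D3 (N / 1000) (by omega)]
    rw [show Int.toNat 3 = 3 from rfl]
    simp only [List.take_succ_cons, List.take_zero]
    rw [show N / 100000 % 10 = N / 1000 / 100 % 10 by omega,
      show N / 10000 % 10 = N / 1000 / 10 % 10 by omega]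
  · -- second component
    rw [PySem.Int.toStr, pv_toChars (N % 1000 / 100), pv_D_small (N % 1000 / 100) (by omega)]
    rw [show N % 1000 / 100 = N / 100 % 10 by omega]
    rfl
  · -- third component
    rw [PySem.List.slice_from _ (by norm_num)]
    rw [show Int.toNat 4 = 4 from rfl]
    simp only [List.drop_succ_cons, List.drop_zero]
    rw [hof, Option.getD_some]

-- ===== VERDICT (by name: the statement is the Claim_ definition above) =====
theorem from_share_spec : Claim_equal_from_share := by
  intro data _hdom hpre
  have hpre' : ∀ c ∈ data.toList, c ∈ pvCharset := by
    simpa [Pre_from_share, List.all_eq_true] using hpre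
  show from_share data = from_share_alt data
  rw [from_share, pvBase62ToSix, PySem.List.foldl_append_singleton_eq_map,
    PySem.List.foldl_append_singleton_eq_map, List.nil_append, List.nil_append, List.map_map,
    from_share_alt, PySem.List.foldl_append_singleton_eq_map, List.nil_append]
  apply List.map_congr_left
  intro i hi
  obtain ⟨hi0, hilt, -⟩ := (PySem.List.mem_pyRange_iff_of_pos (by norm_num) i).mp hi
  have hsub : ∀ c ∈ PySem.List.slice data.toList (some i) (some (i + 3)), c ∈ pvCharset :=
    fun c hc => hpre' c (PySem.List.mem_of_mem_slice _ _ _ hc)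
  have hlen : (PySem.List.slice data.toList (some i) (some (i + 3))).length ≤ 3 := by
    rw [PySem.List.slice_toNat _ hi0 (by omega)]
    calc ((data.toList.drop i.toNat).take ((i + 3).toNat - i.toNat)).length
        ≤ (i + 3).toNat - i.toNat := List.length_take_le _ _
      _ ≤ 3 := by omega
  exact pv_chunk _ hsub hlen
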